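-- pv_equiv track=rewrite | github.com/philipptrenz/Text-Visualisation-in-Practice | 07_knowledge_graphs/07_knowledge_graphs.py | get_all_connected_nodes
-- ===== SOURCE A (Python) =====
-- def get_all_connected_nodes(node, graph):
--     nodes = list()
--     edges = list()
--     for e in graph['edges']:
--         if node == e['from'] and node == e['to']: continue
--         if node == e['from']:
--             nodes.append(e['to'])
--             edges.append(e)
--         if node == e['to']:
--             nodes.append(e['from'])
--             edges.append(e)
--     return nodes, edges
-- ===== SOURCE B (Python) =====
-- def get_all_connected_nodes(node, graph):
--     # Divide and conquer over the edge list: split in halves, solve each half,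
--     # concatenate the (neighbours, edges) sub-results in order.
--     def solve(edges):
--         if len(edges) <= 1:
--             if edges:
--                 e = edges[0]
--                 if (node == e['from']) != (node == e['to']):
--                     return [e['to'] if node == e['from'] else e['from']], [e]
--             return [], []
--         mid = len(edges) // 2
--         ln, le = solve(edges[:mid])
--         rn, re_ = solve(edges[mid:])
--         return ln + rn, le + re_
--     return solve(list(graph['edges']))
-- ===== Notes on version B (the rewrite author's own statement) =====
-- stated objective: alternative
-- what changed: B replaces A's single linear scan with two accumulators by a divide-and-conquer recursion that splits the edge list in halves, solves each half (XOR test drops self-loops and picks the opposite endpoint) and concatenates the sub-results in order.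
import Mathlib
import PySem

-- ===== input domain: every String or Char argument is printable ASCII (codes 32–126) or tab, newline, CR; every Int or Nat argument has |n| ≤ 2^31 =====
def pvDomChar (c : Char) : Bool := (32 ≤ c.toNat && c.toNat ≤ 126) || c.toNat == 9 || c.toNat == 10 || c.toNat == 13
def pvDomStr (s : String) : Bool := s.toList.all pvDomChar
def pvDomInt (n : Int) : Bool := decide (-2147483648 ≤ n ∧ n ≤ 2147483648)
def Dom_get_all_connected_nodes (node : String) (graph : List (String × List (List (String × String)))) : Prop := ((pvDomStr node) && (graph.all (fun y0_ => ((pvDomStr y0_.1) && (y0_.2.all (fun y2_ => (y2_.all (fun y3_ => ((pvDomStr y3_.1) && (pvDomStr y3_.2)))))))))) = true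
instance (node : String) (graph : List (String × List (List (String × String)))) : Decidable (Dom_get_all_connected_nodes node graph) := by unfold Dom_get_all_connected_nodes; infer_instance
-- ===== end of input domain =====

-- ===== PORT A =====
-- B is a divide-and-conquer recursion over the edge list instead of A's linear two-accumulator scan (alternative decomposition; same result).
-- first-match lookup in an association list (Python dict indexing d[k]; none = KeyError)
def pvLookup (d : List (String × String)) (k : String) : Option String :=
  (d.find? (fun p => p.1 == k)).map (·.2)

-- graph['edges'] (first-match; Pre_ guarantees the key is present, so the [] default is never used inside Pre_)
def pvEdges (graph : List (String × List (List (String × String)))) : List (List (String × String)) :=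
  ((graph.find? (fun p => p.1 == "edges")).map (·.2)).getD []

def get_all_connected_nodes (node : String) (graph : List (String × List (List (String × String)))) : List String × (List (List (String × String))) :=
  (pvEdges graph).foldl (fun acc e =>
    let f := (pvLookup e "from").getD ""
    let t := (pvLookup e "to").getD ""
    if node == f && node == t then acc
    else
      let acc1 := if node == f then (acc.1 ++ [t], acc.2 ++ [e]) else acc
      if node == t then (acc1.1 ++ [f], acc1.2 ++ [e]) else acc1)
    ([], [])

-- ===== PORT B =====
-- divide-and-conquer helper: split the edge list in halves, solve each, concatenate
def pvSolve (node : String) (l : List (List (String × String))) : List String × (List (List (String × String))) :=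
  if h : l.length ≤ 1 then
    match l with
    | [] => ([], [])
    | e :: _ =>
      let f := (pvLookup e "from").getD ""
      let t := (pvLookup e "to").getD ""
      if (node == f) != (node == t) then ([if node == f then t else f], [e]) else ([], [])
  else
    let mid := l.length / 2
    let left := pvSolve node (l.take mid)
    let right := pvSolve node (l.drop mid)
    (left.1 ++ right.1, left.2 ++ right.2)
termination_by l.length
decreasing_by
  · simp only [List.length_take]; omega
  · simp only [List.length_drop]; omega

def get_all_connected_nodes_alt (node : String) (graph : List (String × List (List (String × String)))) : List String × (List (List (String × String))) :=
  pvSolve node (pvEdges graph)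

-- ===== PRECONDITION & SPEC =====
-- Pre_ excludes exactly the inputs where Python A raises KeyError: graph lacks the key 'edges', or some edge dict lacks 'from' or 'to'.
def Pre_get_all_connected_nodes (node : String) (graph : List (String × List (List (String × String)))) : Prop :=
  (graph.find? (fun p => p.1 == "edges")).isSome = true ∧
  ∀ e ∈ pvEdges graph, (pvLookup e "from").isSome = true ∧ (pvLookup e "to").isSome = true
instance (node : String) (graph : List (String × List (List (String × String)))) : Decidable (Pre_get_all_connected_nodes node graph) := by unfold Pre_get_all_connected_nodes; infer_instance

def pvWitness_get_all_connected_nodes : String × (List (String × List (List (String × String)))) :=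
  ("a", [("edges", [[("from", "a"), ("to", "b")], [("from", "c"), ("to", "a")]])])

def Spec_get_all_connected_nodes (node : String) (graph : List (String × List (List (String × String)))) (out : List String × (List (List (String × String)))) : Prop := out = get_all_connected_nodes_alt node graph
instance (node : String) (graph : List (String × List (List (String × String)))) (out : List String × (List (List (String × String)))) : Decidable (Spec_get_all_connected_nodes node graph out) := by unfold Spec_get_all_connected_nodes; infer_instance

-- ===== CLAIM (what is proved, stated in full; the proofs are below) =====
def Claim_equal_get_all_connected_nodes : Prop := ∀ (node : String) (graph : List (String × List (List (String × String)))), Dom_get_all_connected_nodes node graph → Pre_get_all_connected_nodes node graph → Spec_get_all_connected_nodes node graph (get_all_connected_nodes node graph)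

-- ===== LEMMAS AND PROOFS =====

-- shared specification form: the connected edges and the opposite endpoints, as filter/map
def pvKeep (node : String) (e : List (String × String)) : Bool :=
  (node == (pvLookup e "from").getD "") != (node == (pvLookup e "to").getD "")
def pvOther (node : String) (e : List (String × String)) : String :=
  if node == (pvLookup e "from").getD "" then (pvLookup e "to").getD "" else (pvLookup e "from").getD ""

-- A's loop with a generalized accumulator equals the accumulator followed by the filter/map of the remaining edges.
theorem pv_fold_eq (node : String) (l : List (List (String × String))) (ns : List String) (es : List (List (String × String))) :
    l.foldl (fun acc e =>
      let f := (pvLookup e "from").getD ""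
      let t := (pvLookup e "to").getD ""
      if node == f && node == t then acc
      else
        let acc1 := if node == f then (acc.1 ++ [t], acc.2 ++ [e]) else acc
        if node == t then (acc1.1 ++ [f], acc1.2 ++ [e]) else acc1)
      (ns, es)
    = (ns ++ (l.filter (pvKeep node)).map (pvOther node), es ++ l.filter (pvKeep node)) := by
  induction l generalizing ns es with
  | nil => simp
  | cons e rest ih =>
    cases hf : (node == (pvLookup e "from").getD "") <;>
      cases ht : (node == (pvLookup e "to").getD "") <;>
      simp only [List.foldl_cons, List.filter_cons, List.map_cons, pvKeep, pvOther, hf, ht,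
        Bool.and_self, Bool.true_and, Bool.false_and, bne, Bool.xor_false, Bool.xor_true,
        Bool.not_true, Bool.not_false, if_true, if_false, ite_true, ite_false, ih] <;>
      simp_all [pvOther]

-- B's divide-and-conquer equals the same filter/map (strong induction on length).
theorem pv_solve_eq (node : String) : ∀ (n : Nat) (l : List (List (String × String))), l.length ≤ n →
    pvSolve node l = ((l.filter (pvKeep node)).map (pvOther node), l.filter (pvKeep node)) := by
  intro n
  induction n with
  | zero =>
    intro l hl
    have : l = [] := List.eq_nil_of_length_eq_zero (Nat.le_zero.mp hl)
    subst this; simp [pvSolve]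
  | succ n ih =>
    intro l hl
    rw [pvSolve]
    by_cases h1 : l.length ≤ 1
    · match l with
      | [] => simp
      | [e] =>
        cases hf : (node == (pvLookup e "from").getD "") <;>
          cases ht : (node == (pvLookup e "to").getD "") <;>
          simp_all [pvKeep, pvOther, List.filter_cons]
      | _ :: _ :: _ => simp at h1
    · simp only [dif_neg h1]
      have hlen : 2 ≤ l.length := by omega
      have hm1 : (l.take (l.length / 2)).length ≤ n := by
        simp only [List.length_take]; omega
      have hm2 : (l.drop (l.length / 2)).length ≤ n := by
        simp only [List.length_drop]; omega
      rw [ih _ hm1, ih _ hm2]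
      have h2 : l.filter (pvKeep node)
          = (l.take (l.length / 2)).filter (pvKeep node) ++ (l.drop (l.length / 2)).filter (pvKeep node) := by
        rw [← List.filter_append, List.take_append_drop]
      rw [h2]
      simp [List.map_append]

-- ===== VERDICT (by name: the statement is the Claim_ definition above) =====
theorem get_all_connected_nodes_spec : Claim_equal_get_all_connected_nodes := by
  intro node graph _ _
  unfold Spec_get_all_connected_nodes get_all_connected_nodes get_all_connected_nodes_alt
  rw [pv_solve_eq node (pvEdges graph).length _ (le_refl _)]
  simpa using pv_fold_eq node (pvEdges graph) [] []
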